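-- pv_equiv track=rewrite | github.com/evilfps/bigbrightpaints-erp | scripts/harness_orchestrator.py | cross_slice_overlaps
-- ===== SOURCE A (Python) =====
-- def cross_slice_overlaps(
--     slice_changed: dict[str, set[str]],
--     slice_agents: dict[str, str],
-- ) -> dict[str, list[tuple[str, str]]]:
--     overlap_map: dict[str, list[tuple[str, str]]] = {sid: [] for sid in slice_changed}
--     ids = sorted(slice_changed.keys())
--     for i, sid_a in enumerate(ids):
--         for sid_b in ids[i + 1 :]:
--             if slice_agents.get(sid_a) == slice_agents.get(sid_b):
--                 continue
--             overlap = sorted(slice_changed[sid_a].intersection(slice_changed[sid_b]))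
--             if not overlap:
--                 continue
--             for f in overlap:
--                 overlap_map[sid_a].append((sid_b, f))
--                 overlap_map[sid_b].append((sid_a, f))
--     return overlap_map
-- ===== SOURCE B (Python) =====
-- def cross_slice_overlaps(slice_changed, slice_agents):
--     ids = sorted(slice_changed)
--     return {
--         s: [
--             (t, f)
--             for t in ids
--             if t != s and slice_agents.get(t) != slice_agents.get(s)
--             for f in sorted(slice_changed[s] & slice_changed[t])
--         ]
--         for s in slice_changed
--     }
-- ===== Notes on version B (the rewrite author's own statement) =====
-- stated objective: simpler
-- what changed: Replaces the pairwise double loop that mutates two rows of a shared dict per unordered pair with a direct per-key comprehension: each slice's overlap row is computed independently as one pass over the sorted ids, with no mutation; correctness rests on the proved fact that A's interleaved appends leave each row sorted by (partner, file).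
import Mathlib
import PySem

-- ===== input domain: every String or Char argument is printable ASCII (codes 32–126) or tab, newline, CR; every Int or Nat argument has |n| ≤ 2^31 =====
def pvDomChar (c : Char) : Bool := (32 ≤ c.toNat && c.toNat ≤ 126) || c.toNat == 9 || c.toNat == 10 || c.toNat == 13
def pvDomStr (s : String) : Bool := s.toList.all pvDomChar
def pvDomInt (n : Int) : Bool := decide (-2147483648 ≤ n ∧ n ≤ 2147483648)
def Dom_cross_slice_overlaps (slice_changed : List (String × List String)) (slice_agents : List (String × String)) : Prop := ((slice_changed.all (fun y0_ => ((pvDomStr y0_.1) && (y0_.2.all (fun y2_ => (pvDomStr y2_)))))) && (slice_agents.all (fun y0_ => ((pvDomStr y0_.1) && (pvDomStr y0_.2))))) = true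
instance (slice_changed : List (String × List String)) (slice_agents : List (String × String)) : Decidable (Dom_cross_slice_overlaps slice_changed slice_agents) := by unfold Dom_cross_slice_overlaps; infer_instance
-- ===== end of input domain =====

-- B computes each slice's overlap row directly as one pass over the sorted ids (no mutation of a
-- shared dict), instead of A's pairwise double loop appending into two rows per unordered pair.
-- Objective: simpler. Return-value equivalence; neither version mutates its arguments.

-- ===== PORT A =====
-- slice_agents.get(sid)
def csoAg (slice_agents : List (String × String)) (t : String) : Option String :=
  (PySem.Dict.mk slice_agents).get? t

-- slice_changed[sid]; the sids looked up always come from slice_changed's keys, so the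
-- KeyError case of Python's d[k] is unreachable and the default [] is never produced.
def csoFiles (slice_changed : List (String × List String)) (t : String) : List String :=
  ((PySem.Dict.mk slice_changed).get? t).getD []

-- for f in overlap: overlap_map[sid_a].append((sid_b, f)); overlap_map[sid_b].append((sid_a, f))
-- (both keys are always present in overlap_map, so Dict.modify with default [] is exactly the append)
def csoAppend2 (a b : String) (d : PySem.Dict String (List (String × String)))
    (ov : List String) : PySem.Dict String (List (String × String)) :=
  ov.foldl (fun d f => (d.modify a [] (· ++ [(b, f)])).modify b [] (· ++ [(a, f)])) d

-- the body of the outer loop: for sid_b in ids[i+1:]  (rest = ids[i+1:])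
def csoInner (slice_changed : List (String × List String)) (slice_agents : List (String × String))
    (a : String) (rest : List String) (d : PySem.Dict String (List (String × String))) :
    PySem.Dict String (List (String × String)) :=
  rest.foldl (fun d b =>
    if csoAg slice_agents a == csoAg slice_agents b then d
    else
      let ov := PySem.List.sorted
        (PySem.Set.inter (csoFiles slice_changed a) (csoFiles slice_changed b)) (fun f => f)
      if ov = [] then d
      else csoAppend2 a b d ov) d

-- for i, sid_a in enumerate(ids): for sid_b in ids[i+1:]: …  — the enumerate/slice pairing:
-- each element together with the remainder of the list (ids[i+1:] is exactly the tail here).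
def csoOuter (slice_changed : List (String × List String)) (slice_agents : List (String × String)) :
    List String → PySem.Dict String (List (String × String)) → PySem.Dict String (List (String × String))
  | [], d => d
  | a :: rest, d => csoOuter slice_changed slice_agents rest (csoInner slice_changed slice_agents a rest d)

def cross_slice_overlaps (slice_changed : List (String × List String)) (slice_agents : List (String × String)) : List (String × List (String × String)) :=
  let ks := (PySem.Dict.mk slice_changed).keys
  -- overlap_map = {sid: [] for sid in slice_changed}
  let overlap_map : PySem.Dict String (List (String × String)) :=
    ks.foldl (fun d k => d.insert k ([] : List (String × String))) (PySem.Dict.mk [])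
  -- ids = sorted(slice_changed.keys())
  let ids := PySem.List.sorted ks (fun s => s)
  (csoOuter slice_changed slice_agents ids overlap_map).items

-- ===== PORT B =====
-- the per-key comprehension: [(t, f) for t in ids if t != s and slice_agents.get(t) != slice_agents.get(s)
--                                    for f in sorted(slice_changed[s] & slice_changed[t])]
def csoAltRow (slice_changed : List (String × List String)) (slice_agents : List (String × String))
    (ids : List String) (s : String) : List (String × String) :=
  ids.flatMap (fun t =>
    if t ≠ s ∧ csoAg slice_agents t ≠ csoAg slice_agents s then
      (PySem.List.sorted
        (PySem.Set.inter (csoFiles slice_changed s) (csoFiles slice_changed t)) (fun f => f)).map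
        (fun f => (t, f))
    else [])

def cross_slice_overlaps_alt (slice_changed : List (String × List String)) (slice_agents : List (String × String)) : List (String × List (String × String)) :=
  let ids := PySem.List.sorted ((PySem.Dict.mk slice_changed).keys) (fun s => s)
  -- {s: [ … ] for s in slice_changed}
  (((PySem.Dict.mk slice_changed).keys).foldl
    (fun d s => d.insert s (csoAltRow slice_changed slice_agents ids s)) (PySem.Dict.mk [])).items

-- ===== PRECONDITION & SPEC =====
-- Pre_ excludes association lists in which slice_changed has duplicate dict keys or a duplicate
-- element inside one of its file lists: such lists do not represent any Python dict-of-sets input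
-- (dicts cannot repeat keys, sets cannot repeat elements), so behaviour there is an encoding
-- artefact and nothing is claimed.
def Pre_cross_slice_overlaps (slice_changed : List (String × List String)) (slice_agents : List (String × String)) : Prop :=
  (slice_changed.map Prod.fst).Nodup ∧ ∀ p ∈ slice_changed, p.2.Nodup
instance (slice_changed : List (String × List String)) (slice_agents : List (String × String)) : Decidable (Pre_cross_slice_overlaps slice_changed slice_agents) := by unfold Pre_cross_slice_overlaps; infer_instance

def pvWitness_cross_slice_overlaps : (List (String × List String)) × (List (String × String)) :=
  ([("s1", ["f", "g"]), ("s2", ["g"])], [("s1", "alice"), ("s2", "bob")])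

def Spec_cross_slice_overlaps (slice_changed : List (String × List String)) (slice_agents : List (String × String)) (out : List (String × List (String × String))) : Prop := out = cross_slice_overlaps_alt slice_changed slice_agents
instance (slice_changed : List (String × List String)) (slice_agents : List (String × String)) (out : List (String × List (String × String))) : Decidable (Spec_cross_slice_overlaps slice_changed slice_agents out) := by unfold Spec_cross_slice_overlaps; infer_instance

-- ===== CLAIM (what is proved, stated in full; the proofs are below) =====
def Claim_equal_cross_slice_overlaps : Prop := ∀ (slice_changed : List (String × List String)) (slice_agents : List (String × String)), Dom_cross_slice_overlaps slice_changed slice_agents → Pre_cross_slice_overlaps slice_changed slice_agents → Spec_cross_slice_overlaps slice_changed slice_agents (cross_slice_overlaps slice_changed slice_agents)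

-- ===== LEMMAS AND PROOFS =====

-- the contribution of partner t to the row of s (exactly the flatMap body of csoAltRow)
def csoContrib (sc : List (String × List String)) (sa : List (String × String))
    (s t : String) : List (String × String) :=
  if t ≠ s ∧ csoAg sa t ≠ csoAg sa s then
    (PySem.List.sorted (PySem.Set.inter (csoFiles sc s) (csoFiles sc t)) (fun f => f)).map
      (fun f => (t, f))
  else []

-- a sorted intersection of two duplicate-free lists is symmetric in its arguments
theorem cso_inter_symm (xs ys : List String) (hx : xs.Nodup) (hy : ys.Nodup) :
    PySem.List.sorted (PySem.Set.inter xs ys) (fun f => f) =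
      PySem.List.sorted (PySem.Set.inter ys xs) (fun f => f) := by
  apply PySem.List.sorted_eq_sorted_of_perm _ _ _ (fun a b h => h)
  apply (List.perm_ext_iff_of_nodup (hx.filter _) (hy.filter _)).mpr
  intro x
  simp [List.mem_filter]
  tauto

theorem csoFiles_nodup (sc : List (String × List String))
    (hf : ∀ p ∈ sc, p.2.Nodup) (t : String) : (csoFiles sc t).Nodup := by
  simp [csoFiles, PySem.Dict.get?]
  cases h : List.find? (fun p => p.1 == t) sc with
  | none => simp
  | some p => simp; exact hf p (List.mem_of_find?_eq_some h)

theorem cso_get?_modify (d : PySem.Dict String (List (String × String))) (k k' : String)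
    (f : List (String × String) → List (String × String)) :
    (d.modify k [] f).get? k' = if k' = k then some (f (d.getD k [])) else d.get? k' := by
  simp [PySem.Dict.modify, PySem.Dict.get?_insert]

-- the innermost loop: the two interleaved appends commute into one append per row
theorem csoAppend2_get? (a b : String) (hab : a ≠ b)
    (ov : List String) (d : PySem.Dict String (List (String × String)))
    (va vb : List (String × String)) (ha : d.get? a = some va) (hb : d.get? b = some vb)
    (s : String) :
    (csoAppend2 a b d ov).get? s =
      if s = a then some (va ++ ov.map (fun f => (b, f)))
      else if s = b then some (vb ++ ov.map (fun f => (a, f)))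
      else d.get? s := by
  induction ov generalizing d va vb with
  | nil => simp [csoAppend2]; split_ifs with h1 h2 <;> simp_all
  | cons f t ih =>
    have hga : d.getD a [] = va := by simp [PySem.Dict.getD_eq_get?_getD, ha]
    have hgb : (d.modify a [] (· ++ [(b, f)])).getD b [] = vb := by
      simp [PySem.Dict.getD_eq_get?_getD, cso_get?_modify, hab.symm, hb]
    have step :
        ((d.modify a [] (· ++ [(b, f)])).modify b [] (· ++ [(a, f)])).get? a = some (va ++ [(b, f)]) ∧
        ((d.modify a [] (· ++ [(b, f)])).modify b [] (· ++ [(a, f)])).get? b = some (vb ++ [(a, f)]) := by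
      constructor <;> simp [cso_get?_modify, hab, hga, hgb]
    have := ih ((d.modify a [] (· ++ [(b, f)])).modify b [] (· ++ [(a, f)]))
        (va ++ [(b, f)]) (vb ++ [(a, f)]) step.1 step.2
    simp only [csoAppend2, List.foldl_cons] at *
    rw [this]
    split_ifs <;> simp_all [cso_get?_modify]

-- one step of the inner loop, expressed through csoContrib (for both touched rows)
theorem csoStep_get? (sc : List (String × List String)) (sa : List (String × String))
    (hf : ∀ p ∈ sc, p.2.Nodup) (a b : String) (hab : a ≠ b)
    (d : PySem.Dict String (List (String × String)))
    (va vb : List (String × String)) (ha : d.get? a = some va) (hb : d.get? b = some vb)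
    (s : String) :
    ((if csoAg sa a == csoAg sa b then d
      else
        let ov := PySem.List.sorted (PySem.Set.inter (csoFiles sc a) (csoFiles sc b)) (fun f => f)
        if ov = [] then d else csoAppend2 a b d ov)).get? s =
      if s = a then some (va ++ csoContrib sc sa a b)
      else if s = b then some (vb ++ csoContrib sc sa b a)
      else d.get? s := by
  have hsym := cso_inter_symm (csoFiles sc a) (csoFiles sc b) (csoFiles_nodup sc hf a) (csoFiles_nodup sc hf b)
  by_cases hag : csoAg sa a = csoAg sa b
  · simp only [csoContrib, hag, beq_iff_eq]
    have : ∀ t, ¬ (t ≠ s ∧ csoAg sa t ≠ csoAg sa t) := by tauto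
    split_ifs with h1 h2 <;> simp_all [csoContrib]
  · rw [if_neg (by simpa using hag)]
    by_cases hov : PySem.List.sorted (PySem.Set.inter (csoFiles sc a) (csoFiles sc b)) (fun f => f) = []
    · simp only [hov]
      have hc1 : csoContrib sc sa a b = [] := by
        simp [csoContrib, hov]
      have hc2 : csoContrib sc sa b a = [] := by
        simp [csoContrib, ← hsym, hov]
      rw [hc1, hc2]
      split_ifs with h1 h2 <;> simp_all
    · rw [if_neg hov]
      rw [csoAppend2_get? a b hab _ d va vb ha hb s]
      have hc1 : csoContrib sc sa a b =
          (PySem.List.sorted (PySem.Set.inter (csoFiles sc a) (csoFiles sc b)) (fun f => f)).map (fun f => (b, f)) := by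
        simp [csoContrib, hab.symm, Ne.symm hag]
      have hc2 : csoContrib sc sa b a =
          (PySem.List.sorted (PySem.Set.inter (csoFiles sc a) (csoFiles sc b)) (fun f => f)).map (fun f => (a, f)) := by
        simp [csoContrib, hab, hag, hsym]
      rw [hc1, hc2]

-- the inner loop appends a's whole row tail and one batch to every later partner
theorem csoInner_get? (sc : List (String × List String)) (sa : List (String × String))
    (hf : ∀ p ∈ sc, p.2.Nodup)
    (a : String) (rest : List String) (d : PySem.Dict String (List (String × String)))
    (va : List (String × String))
    (hna : a ∉ rest) (hnd : rest.Nodup) (ha : d.get? a = some va)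
    (hpres : ∀ b ∈ rest, (d.get? b).isSome) (s : String) :
    (csoInner sc sa a rest d).get? s =
      if s = a then some (va ++ rest.flatMap (csoContrib sc sa a))
      else if s ∈ rest then (d.get? s).map (· ++ csoContrib sc sa s a)
      else d.get? s := by
  induction rest generalizing d va with
  | nil => simp [csoInner]; intro h; simp [h, ha]
  | cons b t ih =>
    have hab : a ≠ b := by simp at hna; tauto
    obtain ⟨vb, hb⟩ : ∃ vb, d.get? b = some vb := by
      have := hpres b (by simp); exact Option.isSome_iff_exists.mp this
    have hstep := fun s => csoStep_get? sc sa hf a b hab d va vb ha hb s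
    simp only [csoInner, List.foldl_cons]
    set d1 := (if csoAg sa a == csoAg sa b then d
      else
        let ov := PySem.List.sorted (PySem.Set.inter (csoFiles sc a) (csoFiles sc b)) (fun f => f)
        if ov = [] then d else csoAppend2 a b d ov) with hd1
    have ha1 : d1.get? a = some (va ++ csoContrib sc sa a b) := by rw [hstep a]; simp
    have hpres1 : ∀ c ∈ t, (d1.get? c).isSome := by
      intro c hc
      have hcs := hpres c (by simp [hc])
      rw [hstep c]
      split_ifs <;> simp_all
    have := ih d1 (va ++ csoContrib sc sa a b) (by simp at hna; tauto) (hnd.of_cons) ha1 hpres1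
    rw [show (csoInner sc sa a t d1) = List.foldl _ d1 t from rfl] at this
    rw [this]
    by_cases hsa : s = a
    · subst hsa
      have hsb : s ∉ t := by simp at hna; tauto
      simp only [if_pos rfl]
      simp [List.append_assoc]
    · by_cases hsb : s = b
      · subst hsb
        have hst : s ∉ t := (List.nodup_cons.mp hnd).1
        simp [hsa, hst, hstep s, hb]
      · by_cases hst : s ∈ t
        · simp [hsa, hst, hstep s, hsb]
        · simp [hsa, hst, hsb, hstep s]

-- the whole double loop: each present row receives, in ids order, one batch per partner
theorem csoOuter_get? (sc : List (String × List String)) (sa : List (String × String))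
    (hf : ∀ p ∈ sc, p.2.Nodup)
    (R : List String) (d : PySem.Dict String (List (String × String)))
    (hnd : R.Nodup) (hpres : ∀ t ∈ R, (d.get? t).isSome) (s : String) :
    (csoOuter sc sa R d).get? s =
      if s ∈ R then (d.get? s).map (· ++ R.flatMap (csoContrib sc sa s)) else d.get? s := by
  induction R generalizing d with
  | nil => simp [csoOuter]
  | cons a R' ih =>
    obtain ⟨va, ha⟩ : ∃ va, d.get? a = some va := by
      have := hpres a (by simp); exact Option.isSome_iff_exists.mp this
    have hna : a ∉ R' := (List.nodup_cons.mp hnd).1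
    have hinner := fun s => csoInner_get? sc sa hf a R' d va hna hnd.of_cons ha
      (fun b hb => hpres b (by simp [hb])) s
    have hpres1 : ∀ t ∈ R', ((csoInner sc sa a R' d).get? t).isSome := by
      intro c hc
      have hcs := hpres c (by simp [hc])
      rw [hinner c]
      split_ifs <;> simp_all
    simp only [csoOuter]
    rw [ih _ hnd.of_cons hpres1]
    by_cases hsa : s = a
    · subst hsa
      have hca : csoContrib sc sa s s = [] := by simp [csoContrib]
      simp [hna, hinner s, ha, hca]
    · by_cases hsR : s ∈ R'
      · simp [hsR, hsa, hinner s]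
        cases h : d.get? s <;> simp [List.append_assoc]
      · simp [hsR, hsa, hinner s]

theorem cso_keys_modify (d : PySem.Dict String (List (String × String))) (k : String)
    (f : List (String × String) → List (String × String)) (h : (d.get? k).isSome) :
    (d.modify k [] f).keys = d.keys := by
  apply PySem.Dict.keys_insert_of_contains
  rw [PySem.Dict.contains_eq_isSome_get?]; exact h

theorem csoAppend2_keys (a b : String) (hab : a ≠ b)
    (ov : List String) (d : PySem.Dict String (List (String × String)))
    (ha : (d.get? a).isSome) (hb : (d.get? b).isSome) :
    (csoAppend2 a b d ov).keys = d.keys := by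
  induction ov generalizing d with
  | nil => rfl
  | cons f t ih =>
    have h1 : ((d.modify a [] (· ++ [(b, f)])).get? b).isSome := by
      rw [cso_get?_modify]; simp [hab.symm, hb]
    have h2a : (((d.modify a [] (· ++ [(b, f)])).modify b [] (· ++ [(a, f)])).get? a).isSome := by
      rw [cso_get?_modify, cso_get?_modify]; simp [hab]
    have h2b : (((d.modify a [] (· ++ [(b, f)])).modify b [] (· ++ [(a, f)])).get? b).isSome := by
      rw [cso_get?_modify]; simp
    simp only [csoAppend2, List.foldl_cons]
    rw [show List.foldl _ _ t = csoAppend2 a b ((d.modify a [] (· ++ [(b, f)])).modify b [] (· ++ [(a, f)])) t from rfl]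
    rw [ih _ h2a h2b, cso_keys_modify _ _ _ h1, cso_keys_modify _ _ _ ha]

theorem csoInner_keys (sc : List (String × List String)) (sa : List (String × String))
    (a : String) (rest : List String) (d : PySem.Dict String (List (String × String)))
    (ha : (d.get? a).isSome) (hpres : ∀ b ∈ rest, (d.get? b).isSome) :
    (csoInner sc sa a rest d).keys = d.keys := by
  induction rest generalizing d with
  | nil => rfl
  | cons b t ih =>
    have hb := hpres b (by simp)
    by_cases hab : a = b
    · subst hab
      simp only [csoInner, List.foldl_cons, beq_self_eq_true, if_pos]
      exact ih d ha (fun c hc => hpres c (by simp [hc]))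
    · set d1 := (if csoAg sa a == csoAg sa b then d
        else
          let ov := PySem.List.sorted (PySem.Set.inter (csoFiles sc a) (csoFiles sc b)) (fun f => f)
          if ov = [] then d else csoAppend2 a b d ov) with hd1
      have hk1 : d1.keys = d.keys := by
        rw [hd1]; dsimp only; split_ifs with h1 h2
        · rfl
        · rfl
        · exact csoAppend2_keys a b hab _ d ha hb
      have hpd1 : ∀ c, (d.get? c).isSome → (d1.get? c).isSome := by
        intro c hc
        rw [hd1]; dsimp only; split_ifs with h1 h2
        · exact hc
        · exact hc
        · obtain ⟨va, hva⟩ := Option.isSome_iff_exists.mp ha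
          obtain ⟨vb, hvb⟩ := Option.isSome_iff_exists.mp hb
          rw [csoAppend2_get? a b hab _ d va vb hva hvb c]
          split_ifs <;> simp [hc]
      simp only [csoInner, List.foldl_cons]
      rw [show List.foldl _ _ t = csoInner sc sa a t d1 from rfl]
      rw [ih d1 (hpd1 a ha) (fun c hc => hpd1 c (hpres c (by simp [hc]))), hk1]

theorem csoOuter_keys (sc : List (String × List String)) (sa : List (String × String))
    (R : List String) (d : PySem.Dict String (List (String × String)))
    (hpres : ∀ t ∈ R, (d.get? t).isSome) :
    (csoOuter sc sa R d).keys = d.keys := by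
  induction R generalizing d with
  | nil => rfl
  | cons a R' ih =>
    have ha := hpres a (by simp)
    have hpd1 : ∀ c ∈ R', ((csoInner sc sa a R' d).get? c).isSome := by
      intro c hc
      have hcs := hpres c (by simp [hc])
      have hkeys := csoInner_keys sc sa a R' d ha (fun b hb => hpres b (by simp [hb]))
      rw [← PySem.Dict.contains_eq_isSome_get?] at hcs ⊢
      rw [PySem.Dict.contains_iff_mem_keys] at hcs ⊢
      rw [hkeys]; exact hcs
    simp only [csoOuter]
    rw [ih _ hpd1]
    exact csoInner_keys sc sa a R' d ha (fun c hc => hpres c (by simp [hc]))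

theorem cso_main (sc : List (String × List String)) (sa : List (String × String))
    (hK : (sc.map Prod.fst).Nodup) (hf : ∀ p ∈ sc, p.2.Nodup) :
    cross_slice_overlaps sc sa = cross_slice_overlaps_alt sc sa := by
  set K : List String := sc.map Prod.fst with hKdef
  set ids := PySem.List.sorted K (fun s => s) with hids
  have hmemids : ∀ t, t ∈ ids ↔ t ∈ K := fun t => PySem.List.mem_sorted K _ false t
  set d0 : PySem.Dict String (List (String × String)) :=
    K.foldl (fun d k => d.insert k ([] : List (String × String))) (PySem.Dict.mk []) with hd0
  have hd0items : d0.items = K.map (fun k => (k, ([] : List (String × String)))) := by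
    rw [hd0]
    rw [PySem.Dict.items_foldl_insert_fresh K (fun x => x) (fun _ => []) (PySem.Dict.mk [])
      (by intro a _; rfl) (by simpa using hK)]
    rfl
  have hd0keys : d0.keys = K := by
    simp [PySem.Dict.keys, hd0items, Function.comp_def]
  have hd0get : ∀ k ∈ K, d0.get? k = some [] := by
    intro k hk
    apply PySem.Dict.get?_of_mem_items
    · rw [hd0items]; exact List.mem_map.mpr ⟨k, hk, rfl⟩
    · rw [hd0keys]; exact hK
  have hpres : ∀ t ∈ ids, (d0.get? t).isSome := by
    intro t ht; rw [hd0get t ((hmemids t).mp ht)]; rfl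
  have hidsnd : ids.Nodup := (PySem.List.sorted_perm K (fun s => s) false).nodup_iff.mpr hK
  set D := csoOuter sc sa ids d0 with hD
  have hDkeys : D.keys = K := by rw [hD, csoOuter_keys sc sa ids d0 hpres, hd0keys]
  have hDget : ∀ k ∈ K, D.getD k [] = ids.flatMap (csoContrib sc sa k) := by
    intro k hk
    rw [PySem.Dict.getD_eq_get?_getD, hD,
      csoOuter_get? sc sa hf ids d0 hidsnd hpres k, if_pos ((hmemids k).mpr hk), hd0get k hk]
    rfl
  have hBitems : cross_slice_overlaps_alt sc sa = K.map (fun s => (s, csoAltRow sc sa ids s)) := by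
    show (K.foldl (fun d s => d.insert s (csoAltRow sc sa ids s)) (PySem.Dict.mk [])).items = _
    rw [PySem.Dict.items_foldl_insert_fresh K (fun x => x) (fun s => csoAltRow sc sa ids s)
      (PySem.Dict.mk []) (by intro a _; rfl) (by simpa using hK)]
    rfl
  show D.items = cross_slice_overlaps_alt sc sa
  rw [PySem.Dict.items_eq_map_keys D (by rw [hDkeys]; exact hK) [], hDkeys, hBitems]
  apply List.map_congr_left
  intro k hk
  rw [hDget k hk]
  rfl

-- ===== VERDICT (by name: the statement is the Claim_ definition above) =====
theorem cross_slice_overlaps_spec : Claim_equal_cross_slice_overlaps := by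
  intro sc sa _ hpre
  unfold Spec_cross_slice_overlaps
  exact cso_main sc sa hpre.1 hpre.2
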